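-- pv_equiv track=rewrite | github.com/haydenmlh/csc108_lectures_practicals | Lectures/Week 6/lecture_6b_tasks.py | enrolled_teams
-- ===== SOURCE A (Python) =====
-- from typing import List
--
-- def enrolled_teams(teams:List[List[int]], enrolled_students:List[int]) -> bool:
--     '''Returns True if all the team members are enrolled students.
--     >>> enrolled_teams([[1, 2], [3, 4]], [1, 2, 3, 4])
--     True
--     >>> enrolled_teams([[1, 2], [3, 4]], [1, 2, 3])
--     False
--     '''
--     for i in range(len(teams)):
--         for j in range(len(teams[i])):
--             found = False
--             for h in range(len(enrolled_students)):
--                 if teams[i][j] == enrolled_students[h]: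
--                     found = True
--             if not found:
--                 return False
--     return True
-- ===== SOURCE B (Python) =====
-- from typing import List
--
-- def enrolled_teams(teams: List[List[int]], enrolled_students: List[int]) -> bool:
--     '''Sort the distinct team members and the distinct enrolled students,
--     then check containment with one merge-style linear scan over the two
--     sorted lists (correct because both lists are strictly increasing).'''
--     members = sorted({m for team in teams for m in team})
--     enrolled = sorted(set(enrolled_students))
--     i = 0
--     for m in members:
--         while i < len(enrolled) and enrolled[i] < m:
--             i += 1
--         if i == len(enrolled) or enrolled[i] != m:
--             return False
--         i += 1
--     return True
-- ===== Notes on version B (the rewrite author's own statement) =====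
-- stated objective: faster
-- what changed: Replaced the triple nested loop with a found flag and early return by sorting the distinct team members and distinct enrolled students and checking containment with one merge-style linear scan over the two sorted lists.
import Mathlib
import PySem

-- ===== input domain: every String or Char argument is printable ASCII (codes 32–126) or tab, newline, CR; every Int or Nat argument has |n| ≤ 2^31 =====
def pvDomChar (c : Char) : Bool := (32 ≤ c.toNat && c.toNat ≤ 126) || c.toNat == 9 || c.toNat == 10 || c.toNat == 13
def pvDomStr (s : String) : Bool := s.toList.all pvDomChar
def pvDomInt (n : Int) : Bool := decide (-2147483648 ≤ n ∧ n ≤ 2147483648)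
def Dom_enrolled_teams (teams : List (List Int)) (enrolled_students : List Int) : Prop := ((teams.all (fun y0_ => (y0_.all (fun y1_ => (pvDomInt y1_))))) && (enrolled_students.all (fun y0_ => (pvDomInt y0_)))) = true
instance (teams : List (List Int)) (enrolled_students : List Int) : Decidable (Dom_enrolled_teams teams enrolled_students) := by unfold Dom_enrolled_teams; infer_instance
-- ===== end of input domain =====

-- B sorts the distinct team members and distinct enrolled students and checks containment
-- with one merge-style linear scan over the two sorted lists, replacing A's triple nested loop.


-- ===== PORT A =====
-- inner h-loop: scans ALL of enrolled_students, setting found whenever it matches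
def pvFoundScan (x : Int) (enrolled_students : List Int) : Bool :=
  enrolled_students.foldl (fun found h => if x = h then true else found) false

-- j-loop over one team: `return False` when the flag stayed false
def pvTeamLoop (team : List Int) (enrolled_students : List Int) : Bool :=
  match team with
  | [] => true
  | x :: rest =>
    if !(pvFoundScan x enrolled_students) then false
    else pvTeamLoop rest enrolled_students

-- i-loop over teams; an early `return False` from the inner loops propagates out
def enrolled_teams (teams : List (List Int)) (enrolled_students : List Int) : Bool :=
  match teams with
  | [] => true
  | t :: ts =>
    match pvTeamLoop t enrolled_students with
    | false => false
    | true => enrolled_teams ts enrolled_students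

-- ===== PORT B =====
-- the inner `while i < len(enrolled) and enrolled[i] < m: i += 1`
def pvAdvance (enrolled : List Int) (m : Int) (i : Nat) : Nat :=
  if h : i < enrolled.length ∧ enrolled[i]! < m then pvAdvance enrolled m (i + 1) else i
termination_by enrolled.length - i
decreasing_by omega

-- the `for m in members` loop carrying the cursor i, with its two early returns
def pvScan (members enrolled : List Int) (i : Nat) : Bool :=
  match members with
  | [] => true
  | m :: rest =>
    let i' := pvAdvance enrolled m i
    if i' = enrolled.length ∨ enrolled[i']! ≠ m then false
    else pvScan rest enrolled (i' + 1)

def enrolled_teams_alt (teams : List (List Int)) (enrolled_students : List Int) : Bool :=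
  let members := PySem.List.sorted (PySem.Set.ofList (teams.flatMap (fun team => team))) (fun x => x) false
  let enrolled := PySem.List.sorted (PySem.Set.ofList enrolled_students) (fun x => x) false
  pvScan members enrolled 0

-- ===== PRECONDITION & SPEC =====
def Spec_enrolled_teams (teams : List (List Int)) (enrolled_students : List Int) (out : Bool) : Prop := out = enrolled_teams_alt teams enrolled_students
instance (teams : List (List Int)) (enrolled_students : List Int) (out : Bool) : Decidable (Spec_enrolled_teams teams enrolled_students out) := by unfold Spec_enrolled_teams; infer_instance

-- ===== CLAIM =====
def Claim_equal_enrolled_teams : Prop := ∀ (teams : List (List Int)) (enrolled_students : List Int), Dom_enrolled_teams teams enrolled_students → Spec_enrolled_teams teams enrolled_students (enrolled_teams teams enrolled_students)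

-- ===== LEMMAS AND PROOFS =====

-- A-side characterisation
theorem pvFoundScan_gen (x : Int) (es : List Int) (b : Bool) :
    es.foldl (fun found h => if x = h then true else found) b = (b || es.contains x) := by
  induction es generalizing b with
  | nil => simp
  | cons h t ih =>
    simp only [List.foldl, List.contains_cons, ih]
    by_cases hx : x = h
    · subst hx; cases b <;> simp
    · simp only [if_neg hx]
      cases b <;> simp [hx]

theorem pvFoundScan_iff (x : Int) (es : List Int) :
    pvFoundScan x es = true ↔ x ∈ es := by
  rw [pvFoundScan, pvFoundScan_gen]; simp

theorem pvTeamLoop_iff (team es : List Int) :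
    pvTeamLoop team es = true ↔ ∀ x ∈ team, x ∈ es := by
  induction team with
  | nil => simp [pvTeamLoop]
  | cons x rest ih =>
    simp only [pvTeamLoop]
    by_cases hx : pvFoundScan x es = true
    · simp only [hx, Bool.not_true, Bool.false_eq_true, if_false, ih, List.mem_cons]
      have hx' := (pvFoundScan_iff x es).mp hx
      constructor
      · intro h y hy; rcases hy with rfl | hy; exact hx'; exact h y hy
      · intro h y hy; exact h y (Or.inr hy)
    · simp only [hx]
      simp only [pvFoundScan_iff] at hx
      simp [hx]

theorem enrolled_teams_iff (teams : List (List Int)) (es : List Int) :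
    enrolled_teams teams es = true ↔ ∀ t ∈ teams, ∀ x ∈ t, x ∈ es := by
  induction teams with
  | nil => simp [enrolled_teams]
  | cons t ts ih =>
    simp only [enrolled_teams]
    cases hT : pvTeamLoop t es with
    | false =>
      have hT' : ¬ ∀ x ∈ t, x ∈ es := by
        rw [← pvTeamLoop_iff]; simp [hT]
      constructor
      · intro h; cases h
      · intro h; exact absurd (h t (by simp)) hT'
    | true =>
      have hT' := (pvTeamLoop_iff t es).mp hT
      simp [ih]
      intro _; exact hT'

-- B-side: specification of the while-loop cursor advance
theorem pvAdvance_spec (enrolled : List Int) (m : Int) (i : Nat) (hi : i ≤ enrolled.length) :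
    i ≤ pvAdvance enrolled m i ∧ pvAdvance enrolled m i ≤ enrolled.length ∧
    (∀ j, i ≤ j → j < pvAdvance enrolled m i → enrolled[j]! < m) ∧
    (pvAdvance enrolled m i < enrolled.length → ¬ enrolled[pvAdvance enrolled m i]! < m) := by
  unfold pvAdvance
  split
  · rename_i h
    have ih := pvAdvance_spec enrolled m (i + 1) (by omega)
    refine ⟨by omega, ih.2.1, ?_, ih.2.2.2⟩
    intro j hj1 hj2
    rcases Nat.eq_or_lt_of_le hj1 with rfl | hj
    · exact h.2
    · exact ih.2.2.1 j hj hj2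
  · rename_i h
    push_neg at h
    exact ⟨le_refl _, hi, fun j hj1 hj2 => absurd hj1 (by omega), fun hlt => not_lt.mpr (h hlt)⟩
termination_by enrolled.length - i
decreasing_by omega

-- getElem! agrees with getElem in range
theorem pvGetBang (l : List Int) (j : Nat) (h : j < l.length) : l[j]! = l[j] :=
  getElem!_pos l j h

-- monotone access in a (≤)-sorted list
theorem pvSortedLe (l : List Int) (hl : l.Pairwise (· ≤ ·)) {p q : Nat}
    (hpq : p ≤ q) (hq : q < l.length) : l[p]'(by omega) ≤ l[q] := by
  rcases Nat.eq_or_lt_of_le hpq with rfl | h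
  · exact le_refl _
  · exact (List.pairwise_iff_getElem.mp hl) p q (by omega) hq h

-- main invariant for the scan loop
theorem pvScan_iff (members enrolled : List Int) (i : Nat)
    (hm : members.Pairwise (· < ·)) (he : enrolled.Pairwise (· ≤ ·))
    (hi : i ≤ enrolled.length)
    (hpre : ∀ m ∈ members, ∀ j, j < i → enrolled[j]! < m) :
    pvScan members enrolled i = true ↔ ∀ m ∈ members, m ∈ enrolled := by
  induction members generalizing i with
  | nil => simp [pvScan]
  | cons m rest ih =>
    obtain ⟨h1, h2, h3, h4⟩ := pvAdvance_spec enrolled m i hi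
    set i' := pvAdvance enrolled m i with hi'
    have hbelow : ∀ j, j < i' → enrolled[j]! < m := by
      intro j hj
      by_cases hji : j < i
      · exact hpre m (by simp) j hji
      · exact h3 j (by omega) hj
    simp only [pvScan, ← hi']
    by_cases hfail : i' = enrolled.length ∨ enrolled[i']! ≠ m
    · simp only [if_pos hfail]
      have hnot : m ∉ enrolled := by
        intro hmem
        obtain ⟨k, hk, hkm⟩ := List.getElem_of_mem hmem
        rcases hfail with hlen | hne
        · have := hbelow k (by omega)
          rw [pvGetBang _ _ hk, hkm] at this; omega
        · by_cases hki : k < i'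
          · have := hbelow k hki
            rw [pvGetBang _ _ hk, hkm] at this; omega
          · have hi'len : i' < enrolled.length := by omega
            have hge : enrolled[i']'hi'len ≤ enrolled[k] := pvSortedLe enrolled he (by omega) hk
            have hnl := h4 hi'len
            rw [pvGetBang _ _ hi'len] at hnl
            rw [hkm] at hge
            rcases lt_or_eq_of_le hge with h | h
            · omega
            · exact hne (by rw [pvGetBang _ _ hi'len, h])
      constructor
      · intro h; cases h
      · intro h; exact absurd (h m (by simp)) hnot
    · simp only [if_neg hfail]
      push_neg at hfail
      obtain ⟨hlen, heq⟩ := hfail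
      have hi'len : i' < enrolled.length := by omega
      have hmmem : m ∈ enrolled := by
        rw [← heq, pvGetBang _ _ hi'len]; exact List.getElem_mem hi'len
      have hrest := ih (i' + 1) (List.Pairwise.sublist (List.sublist_cons_self m rest) hm)
        (by omega)
        (by
          intro m' hm' j hj
          have hmm' : m < m' := (List.pairwise_cons.mp hm).1 m' hm'
          rcases Nat.lt_or_ge j i' with hji | hji
          · exact lt_trans (hbelow j hji) hmm'
          · have : j = i' := by omega
            subst this
            rw [heq]; exact hmm')
      rw [hrest]
      constructor
      · intro h m' hm'
        rcases List.mem_cons.mp hm' with rfl | hm'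
        · exact hmmem
        · exact h m' hm'
      · intro h m' hm'; exact h m' (List.mem_cons_of_mem m hm')

theorem enrolled_teams_alt_iff (teams : List (List Int)) (es : List Int) :
    enrolled_teams_alt teams es = true ↔ ∀ t ∈ teams, ∀ x ∈ t, x ∈ es := by
  unfold enrolled_teams_alt
  have hm : (PySem.List.sorted (PySem.Set.ofList (teams.flatMap (fun team => team))) (fun x => x) false).Pairwise (· < ·) :=
    PySem.List.sorted_ofList_pairwise_lt _
  have he' : (PySem.List.sorted (PySem.Set.ofList es) (fun x => x) false).Pairwise (· < ·) :=
    PySem.List.sorted_ofList_pairwise_lt _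
  rw [pvScan_iff _ _ 0 hm (he'.imp le_of_lt) (Nat.zero_le _) (by intro _ _ j hj; omega)]
  simp only [PySem.List.mem_sorted, PySem.Set.mem_ofList, List.mem_flatMap]
  constructor
  · intro h t ht x hx
    exact h x ⟨t, ht, hx⟩
  · intro h x hx
    obtain ⟨t, ht, hxt⟩ := hx
    exact h t ht x hxt

-- ===== VERDICT =====
theorem enrolled_teams_spec : Claim_equal_enrolled_teams := by
  intro teams es _
  unfold Spec_enrolled_teams
  rw [Bool.eq_iff_iff, enrolled_teams_iff, enrolled_teams_alt_iff]
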